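-- pv_equiv track=rewrite | github.com/minu0508/Algorithm | Python/Programmers/코딩 기초 트레이닝/조건에 맞게 수열 변환하기 2.py | solution
-- ===== SOURCE A (Python) =====
-- def solution(arr):
--     for i in range(len(arr)):
--         step = 0
--         for j in range(len(arr)):
--             if (arr[j] >= 50 and arr[j] % 2 == 0):
--                 arr[j] = arr[j] // 2
--             elif (arr[j] < 50 and arr[j] % 2 != 0):
--                 arr[j] = arr[j] * 2 + 1
--             else:
--                 step += 1
--
--             if(step == len(arr)):
--                 return i
-- ===== SOURCE B (Python) =====
-- def solution(arr):
--     # Per-element algorithm: elements evolve independently, so the first pass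
--     # index at which the whole array is stable equals the maximum, over the
--     # elements, of each element's own stabilisation step count (capped at
--     # len(arr) steps, A's pass budget).  B does not mutate arr (A does).
--     n = len(arr)
--     m = 0
--     for x in arr:
--         t = 0
--         while t < n and ((x >= 50 and x % 2 == 0) or (x < 50 and x % 2 != 0)):
--             x = x // 2 if x >= 50 else x * 2 + 1
--             t += 1
--         m = max(m, t)
--     return m if m < n else None
-- ===== Notes on version B (the rewrite author's own statement) =====
-- stated objective: alternative
-- what changed: Replaces A's repeated in-place whole-array passes with a stable-element counter by a per-element computation: elements evolve independently, so B iterates the transform on each element separately (capped at len(arr) steps), takes the maximum stabilisation count m over the elements, and returns m if m < len(arr) else None; B does not mutate arr (A does), the equivalence is about the return value.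
import Mathlib
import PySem

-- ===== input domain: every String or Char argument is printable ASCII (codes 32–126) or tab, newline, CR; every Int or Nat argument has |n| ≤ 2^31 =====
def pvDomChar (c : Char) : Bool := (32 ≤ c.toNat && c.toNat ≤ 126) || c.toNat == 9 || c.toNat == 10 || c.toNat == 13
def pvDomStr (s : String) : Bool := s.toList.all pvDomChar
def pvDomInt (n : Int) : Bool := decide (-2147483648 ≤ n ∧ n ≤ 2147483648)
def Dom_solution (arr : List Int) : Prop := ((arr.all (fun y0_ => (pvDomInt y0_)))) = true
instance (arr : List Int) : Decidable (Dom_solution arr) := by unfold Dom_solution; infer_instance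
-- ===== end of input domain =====

-- B replaces A's repeated in-place whole-array passes by a per-element stabilisation-step
-- count (elements evolve independently; answer = max count, capped at len(arr)); equivalence
-- is about the return value only (A mutates arr, B does not).


-- ===== PORT A =====
-- inner 'for j in range(len(arr))' loop; k = remaining iterations, j = n - k; the list is
-- updated in place via List.set; after every branch Python checks 'step == len(arr)'.
def solAInner (i : Int) (n : Nat) : Nat → List Int → Int → Sum Int (List Int)
  | 0, arr, _ => Sum.inr arr
  | k+1, arr, step =>
    match PySem.List.pyGet? arr ((n - (k+1) : Nat) : Int) with
    | none => Sum.inr arr   -- unreachable: the index is < n = arr.length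
    | some x =>
      if x ≥ 50 ∧ PySem.Int.mod x 2 = 0 then
        let arr' := arr.set (n - (k+1)) (PySem.Int.floordiv x 2)
        if step = (n : Int) then Sum.inl i else solAInner i n k arr' step
      else if x < 50 ∧ PySem.Int.mod x 2 ≠ 0 then
        let arr' := arr.set (n - (k+1)) (x * 2 + 1)
        if step = (n : Int) then Sum.inl i else solAInner i n k arr' step
      else
        let step' := step + 1
        if step' = (n : Int) then Sum.inl i else solAInner i n k arr step'

-- outer 'for i in range(len(arr))' loop; falling off returns None.
def solAOuter (n : Nat) : Nat → List Int → Option Int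
  | 0, _ => none
  | k+1, arr =>
    match solAInner ((n - (k+1) : Nat) : Int) n n arr 0 with
    | Sum.inl r => some r
    | Sum.inr arr' => solAOuter n k arr'

def solution (arr : List Int) : Option Int := solAOuter arr.length arr.length arr

-- ===== PORT B =====
-- the while-loop guard '(x >= 50 and x % 2 == 0) or (x < 50 and x % 2 != 0)'
def pvApplies (x : Int) : Bool :=
  (decide (x ≥ 50) && decide (PySem.Int.mod x 2 = 0)) ||
  (decide (x < 50) && decide (PySem.Int.mod x 2 ≠ 0))

-- the while-loop body 'x = x // 2 if x >= 50 else x * 2 + 1'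
def pvStep (x : Int) : Int := if x ≥ 50 then PySem.Int.floordiv x 2 else x * 2 + 1

-- 'while t < n and applies: x = step(x); t += 1' — returns the final t; first arg = n - t
def solBSteps : Nat → Int → Nat
  | 0, _ => 0
  | k+1, x => if pvApplies x then solBSteps k (pvStep x) + 1 else 0

-- 'for x in arr: …; m = max(m, t)' then 'return m if m < n else None'
def solution_alt (arr : List Int) : Option Int :=
  let n := arr.length
  let m := arr.foldl (fun m x => max m (solBSteps n x)) 0
  if m < n then some (m : Int) else none

-- ===== PRECONDITION & SPEC =====
def Spec_solution (arr : List Int) (out : Option Int) : Prop := out = solution_alt arr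
instance (arr : List Int) (out : Option Int) : Decidable (Spec_solution arr out) := by unfold Spec_solution; infer_instance

-- ===== CLAIM (what is proved, stated in full; the proofs are below) =====
def Claim_equal_solution : Prop := ∀ (arr : List Int), Dom_solution arr → Spec_solution arr (solution arr)

-- ===== LEMMAS AND PROOFS =====

-- proof-side helper: the full per-element transform (identity on stable elements)
def pvT (x : Int) : Int := if pvApplies x then pvStep x else x

-- proof-side helper: A's fixed-point iteration seen as whole-array passes
def solBGo (n : Nat) : Nat → List Int → Option Int
  | 0, _ => none
  | k+1, arr =>
    if arr.any pvApplies then solBGo n k (arr.map pvT)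
    else some ((n - (k+1) : Nat) : Int)

-- A's 'step' counter after processing prefix p: the number of elements of p in the else branch.
def pvCS (p : List Int) : Int := ((p.filter (fun x => !pvApplies x)).length : Int)

lemma pvCS_le (p : List Int) : pvCS p ≤ (p.length : Int) := by
  unfold pvCS
  exact_mod_cast Nat.cast_le.mpr (List.length_filter_le _ _)

lemma pvCS_eq_iff (p : List Int) : pvCS p = (p.length : Int) ↔ p.any pvApplies = false := by
  unfold pvCS
  rw [Nat.cast_inj, List.length_filter_eq_length_iff, List.any_eq_false]
  simp

lemma pvCS_append (p : List Int) (x : Int) :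
    pvCS (p ++ [x]) = pvCS p + (if pvApplies x then 0 else 1) := by
  unfold pvCS
  rw [List.filter_append, List.filter_cons]
  cases h : pvApplies x
  · simp
  · simp

lemma set_append_len (A : List Int) (x v : Int) (rest : List Int) :
    (A ++ x :: rest).set A.length v = A ++ v :: rest := by
  induction A with
  | nil => simp
  | cons a A ih => simp [ih]

lemma pvT_eq_half {x : Int} (h : x ≥ 50 ∧ PySem.Int.mod x 2 = 0) :
    pvT x = PySem.Int.floordiv x 2 := by
  have happ : pvApplies x = true := by
    simp only [pvApplies, Bool.or_eq_true, Bool.and_eq_true, decide_eq_true_eq]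
    exact Or.inl ⟨h.1, h.2⟩
  simp only [pvT, happ, if_pos, pvStep, if_pos h.1]

lemma pvT_eq_double {x : Int} (h1 : ¬(x ≥ 50 ∧ PySem.Int.mod x 2 = 0))
    (h2 : x < 50 ∧ PySem.Int.mod x 2 ≠ 0) : pvT x = x * 2 + 1 := by
  have happ : pvApplies x = true := by
    simp only [pvApplies, Bool.or_eq_true, Bool.and_eq_true, decide_eq_true_eq]
    exact Or.inr ⟨h2.1, h2.2⟩
  have hlt : ¬ (x ≥ 50) := by omega
  simp only [pvT, happ, if_pos, pvStep, if_neg hlt]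

lemma pvT_stable {x : Int} (h : pvApplies x = false) : pvT x = x := by
  simp [pvT, h]

lemma inner_eq (i : Int) (n : Nat) :
    ∀ (suf p : List Int), n = p.length + suf.length →
    (suf = [] → p.any pvApplies = true) →
    solAInner i n suf.length (p.map pvT ++ suf) (pvCS p) =
      (if (p ++ suf).any pvApplies then Sum.inr ((p ++ suf).map pvT) else Sum.inl i) := by
  intro suf
  induction suf with
  | nil =>
    intro p hn hne
    simp [solAInner, hne rfl]
  | cons x rest ih =>
    intro p hn hne
    have hn' : n = p.length + rest.length + 1 := by
      rw [hn, List.length_cons]; omega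
    have hidx : n - (rest.length + 1) = (p.map pvT).length := by
      rw [List.length_map]; omega
    have hget : PySem.List.pyGet? (p.map pvT ++ x :: rest)
        ((n - (rest.length + 1) : Nat) : Int) = some x := by
      rw [hidx]; exact PySem.List.pyGet?_append_length _ _ _
    have hcs := pvCS_le p
    have hreassoc : p ++ x :: rest = (p ++ [x]) ++ rest := by simp
    have hlen2 : n = (p ++ [x]).length + rest.length := by
      rw [List.length_append, List.length_cons, List.length_nil]; omega
    by_cases h1 : x ≥ 50 ∧ PySem.Int.mod x 2 = 0
    · have happ : pvApplies x = true := by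
        simp only [pvApplies, Bool.or_eq_true, Bool.and_eq_true, decide_eq_true_eq]
        exact Or.inl ⟨h1.1, h1.2⟩
      have hstep : ¬ (pvCS p = (n : Int)) := by omega
      have htx : pvT x = PySem.Int.floordiv x 2 := pvT_eq_half h1
      have hset : (p.map pvT ++ x :: rest).set (n - (rest.length + 1))
          (PySem.Int.floordiv x 2) = (p ++ [x]).map pvT ++ rest := by
        rw [hidx, set_append_len, List.map_append, List.map_cons, List.map_nil, htx]
        simp
      have hcs2 : pvCS (p ++ [x]) = pvCS p := by rw [pvCS_append]; simp [happ]
      have hIH := ih (p ++ [x]) hlen2 (fun _ => by simp [List.any_append, happ])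
      rw [hcs2] at hIH
      simp only [List.length_cons, solAInner, hget]
      rw [if_pos h1, if_neg hstep, hset, hIH, hreassoc]
    · by_cases h2 : x < 50 ∧ PySem.Int.mod x 2 ≠ 0
      · have happ : pvApplies x = true := by
          simp only [pvApplies, Bool.or_eq_true, Bool.and_eq_true, decide_eq_true_eq]
          exact Or.inr ⟨h2.1, h2.2⟩
        have hstep : ¬ (pvCS p = (n : Int)) := by omega
        have htx : pvT x = x * 2 + 1 := pvT_eq_double h1 h2
        have hset : (p.map pvT ++ x :: rest).set (n - (rest.length + 1))
            (x * 2 + 1) = (p ++ [x]).map pvT ++ rest := by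
          rw [hidx, set_append_len, List.map_append, List.map_cons, List.map_nil, htx]
          simp
        have hcs2 : pvCS (p ++ [x]) = pvCS p := by rw [pvCS_append]; simp [happ]
        have hIH := ih (p ++ [x]) hlen2 (fun _ => by simp [List.any_append, happ])
        rw [hcs2] at hIH
        simp only [List.length_cons, solAInner, hget]
        rw [if_neg h1, if_pos h2, if_neg hstep, hset, hIH, hreassoc]
      · have happ : pvApplies x = false := by
          cases hb : pvApplies x
          · rfl
          · exfalso
            simp only [pvApplies, Bool.or_eq_true, Bool.and_eq_true, decide_eq_true_eq] at hb
            rcases hb with h | h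
            · exact h1 h
            · exact h2 h
        have htx : pvT x = x := pvT_stable happ
        have hcs2 : pvCS (p ++ [x]) = pvCS p + 1 := by rw [pvCS_append]; simp [happ]
        by_cases hdone : pvCS p + 1 = (n : Int)
        · -- all of p ++ [x] stable and rest is empty: Python returns i here
          have hrestlen : rest.length = 0 := by omega
          have hpcs : pvCS p = (p.length : Int) := by omega
          have hrest : rest = [] := List.length_eq_zero_iff.mp hrestlen
          have hpall : p.any pvApplies = false := (pvCS_eq_iff p).mp hpcs
          have hany : (p ++ x :: rest).any pvApplies = false := by
            subst hrest; simp [List.any_append, hpall, happ]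
          simp only [List.length_cons, solAInner, hget]
          rw [if_neg h1, if_neg h2, if_pos hdone, hany]
          simp
        · have hne2 : rest = [] → (p ++ [x]).any pvApplies = true := by
            intro hr
            have hlen3 : ((p ++ [x]).length : Int) = (n : Int) := by
              subst hr; simp at hlen2 ⊢; omega
            cases hq : (p ++ [x]).any pvApplies
            · exfalso
              have := (pvCS_eq_iff (p ++ [x])).mpr hq
              rw [hcs2, hlen3] at this
              exact hdone this
            · rfl
          have hsuf : p.map pvT ++ x :: rest = (p ++ [x]).map pvT ++ rest := by
            rw [List.map_append, List.map_cons, List.map_nil, htx]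
            simp
          have hIH := ih (p ++ [x]) hlen2 hne2
          rw [hcs2] at hIH
          simp only [List.length_cons, solAInner, hget]
          rw [if_neg h1, if_neg h2, if_neg hdone, hsuf, hIH, hreassoc]

lemma outer_eq (n : Nat) (hn : n ≠ 0) :
    ∀ (k : Nat) (arr : List Int), arr.length = n → solAOuter n k arr = solBGo n k arr := by
  intro k
  induction k with
  | zero => intro arr _; rfl
  | succ k ih =>
    intro arr hl
    have hnil : arr = [] → ([] : List Int).any pvApplies = true := by
      intro h; subst h; simp at hl; omega
    have hinner := inner_eq ((n - (k+1) : Nat) : Int) n arr [] (by simp [hl]) hnil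
    simp only [List.map_nil, List.nil_append, pvCS, List.filter_nil, List.length_nil,
      Nat.cast_zero] at hinner
    rw [← hl] at hinner
    unfold solAOuter
    rw [hl] at hinner
    rw [hinner]
    by_cases hany : arr.any pvApplies = true
    · simp only [hany, if_pos]
      rw [ih (arr.map pvT) (by simpa using hl)]
      simp [solBGo, hany]
    · simp only [Bool.not_eq_true] at hany
      simp [hany, solBGo]

-- ===== from pass simulation to B's per-element maxima =====

-- proof-side max-of-f over a list (foldr form, easier to induct on)
def pvMMax (f : Int → Nat) (l : List Int) : Nat := l.foldr (fun x m => max (f x) m) 0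

lemma foldl_max_eq (f : Int → Nat) : ∀ (l : List Int) (a : Nat),
    l.foldl (fun m x => max m (f x)) a = max a (pvMMax f l) := by
  intro l
  induction l with
  | nil => intro a; simp [pvMMax]
  | cons x t ih =>
    intro a
    simp only [List.foldl_cons, pvMMax, List.foldr_cons]
    rw [ih]
    simp only [pvMMax]
    omega

lemma steps_stable {x : Int} (h : pvApplies x = false) (k : Nat) : solBSteps k x = 0 := by
  cases k with
  | zero => rfl
  | succ k => simp [solBSteps, h]

lemma mmax_stable {l : List Int} (h : l.any pvApplies = false) (k : Nat) :
    pvMMax (solBSteps k) l = 0 := by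
  induction l with
  | nil => rfl
  | cons x t ih =>
    simp only [List.any_cons, Bool.or_eq_false_iff] at h
    simp only [pvMMax, List.foldr_cons, steps_stable h.1]
    simpa using ih h.2

lemma mmax_stable' {l : List Int} (h : l.any pvApplies = false) (k : Nat) :
    pvMMax (fun x => solBSteps k (pvT x)) l = 0 := by
  induction l with
  | nil => rfl
  | cons x t ih =>
    simp only [List.any_cons, Bool.or_eq_false_iff] at h
    have : solBSteps k (pvT x) = 0 := by
      rw [pvT_stable h.1]; exact steps_stable h.1 k
    simp only [pvMMax, List.foldr_cons] at ih ⊢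
    rw [this, ih h.2]
    simp

lemma mmax_succ (k : Nat) : ∀ (l : List Int), l.any pvApplies = true →
    pvMMax (solBSteps (k+1)) l = pvMMax (fun x => solBSteps k (pvT x)) l + 1 := by
  intro l
  induction l with
  | nil => intro h; simp at h
  | cons x t ih =>
    intro h
    simp only [pvMMax, List.foldr_cons]
    by_cases hx : pvApplies x = true
    · have hs : solBSteps (k+1) x = solBSteps k (pvT x) + 1 := by
        simp [solBSteps, hx, pvT]
      by_cases ht : t.any pvApplies = true
      · have := ih ht
        simp only [pvMMax] at this
        rw [hs, this]
        omega
      · simp only [Bool.not_eq_true] at ht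
        have h1 := mmax_stable ht (k+1)
        have h2 := mmax_stable' ht k
        simp only [pvMMax] at h1 h2
        rw [hs, h1, h2]
        omega
    · simp only [Bool.not_eq_true] at hx
      have ht : t.any pvApplies = true := by
        simp only [List.any_cons, hx, Bool.false_or] at h
        exact h
      have hs : solBSteps (k+1) x = 0 := steps_stable hx (k+1)
      have hs' : solBSteps k (pvT x) = 0 := by
        rw [pvT_stable hx]; exact steps_stable hx k
      have := ih ht
      simp only [pvMMax] at this
      rw [hs, hs', this]
      omega

lemma mmax_map (f : Int → Nat) (l : List Int) :
    pvMMax f (l.map pvT) = pvMMax (fun x => f (pvT x)) l := by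
  simp [pvMMax, List.foldr_map]

lemma go_eq_mmax (n : Nat) : ∀ (k : Nat) (arr : List Int), k ≤ n →
    solBGo n k arr = if pvMMax (solBSteps k) arr < k
      then some ((n - k + pvMMax (solBSteps k) arr : Nat) : Int) else none := by
  intro k
  induction k with
  | zero => intro arr _; simp [solBGo]
  | succ k ih =>
    intro arr hkn
    by_cases hany : arr.any pvApplies = true
    · have hM := mmax_succ k arr hany
      have hmap := mmax_map (solBSteps k) arr
      unfold solBGo
      rw [if_pos hany, ih (arr.map pvT) (by omega), hmap]
      set M := pvMMax (fun x => solBSteps k (pvT x)) arr with hMdef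
      rw [hM]
      by_cases hlt : M < k
      · rw [if_pos hlt, if_pos (by omega)]
        congr 1
        congr 1
        omega
      · rw [if_neg hlt, if_neg (by omega)]
    · simp only [Bool.not_eq_true] at hany
      have h0 : pvMMax (solBSteps (k+1)) arr = 0 := mmax_stable hany (k+1)
      unfold solBGo
      rw [hany, h0]
      simp

-- ===== VERDICT (by name: the statement is the Claim_ definition above) =====
theorem solution_spec : Claim_equal_solution := by
  intro arr _
  unfold Spec_solution solution solution_alt
  by_cases h : arr.length = 0
  · have : arr = [] := List.length_eq_zero_iff.mp h
    subst this; rfl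
  · rw [outer_eq arr.length h arr.length arr rfl,
      go_eq_mmax arr.length arr.length arr le_rfl]
    simp [foldl_max_eq]
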